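-- pv_equiv track=rewrite | github.com/ignacio-mrtz/ejercicios_python | guia.15-Recursion/ej10.py | _main
-- ===== SOURCE A (Python) =====
-- def _main(cadena,cont_A, cont_E):
--     if len(cadena)==0:
--         return cont_A>cont_E
--     elif cadena[0]=="A":
--         return _main(cadena[1:],cont_A+1,cont_E)
--     elif cadena[0]=="E":
--         return _main(cadena[1:],cont_A,cont_E+1)
--     else:
--         return _main(cadena[1:],cont_A,cont_E)
-- ===== SOURCE B (Python) =====
-- def _main(cadena, cont_A, cont_E):
--     a = sum(1 for c in cadena if c == "A")
--     e = sum(1 for c in cadena if c == "E")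
--     return cont_A + a > cont_E + e
-- ===== Notes on version B (the rewrite author's own statement) =====
-- stated objective: simpler
-- what changed: Replaces the tail recursion (which re-slices cadena[1:] at every step and threads two accumulators) with two direct generator-sum counts of 'A' and 'E' and one comparison.
import Mathlib
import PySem

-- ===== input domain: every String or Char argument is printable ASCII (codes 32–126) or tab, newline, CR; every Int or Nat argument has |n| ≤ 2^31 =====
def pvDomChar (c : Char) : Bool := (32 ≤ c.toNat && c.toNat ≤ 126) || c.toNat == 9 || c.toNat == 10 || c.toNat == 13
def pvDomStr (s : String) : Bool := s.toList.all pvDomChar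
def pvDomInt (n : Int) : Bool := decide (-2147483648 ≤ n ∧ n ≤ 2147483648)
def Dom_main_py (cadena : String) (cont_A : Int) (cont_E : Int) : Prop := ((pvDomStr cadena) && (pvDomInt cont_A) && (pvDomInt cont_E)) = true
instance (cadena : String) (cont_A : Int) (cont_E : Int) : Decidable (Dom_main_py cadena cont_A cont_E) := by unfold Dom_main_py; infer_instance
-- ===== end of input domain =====

-- B replaces A's accumulator recursion with two direct counts and one comparison (same cost, plainer).
-- ===== PORT A =====
-- A recurses on cadena[0] / cadena[1:]; ported as structural recursion on the char list.
def mainGo : List Char → Int → Int → Bool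
  | [], a, e => decide (a > e)
  | c :: rest, a, e =>
      if c == 'A' then mainGo rest (a + 1) e
      else if c == 'E' then mainGo rest a (e + 1)
      else mainGo rest a e

def main_py (cadena : String) (cont_A : Int) (cont_E : Int) : Bool :=
  mainGo cadena.toList cont_A cont_E

-- ===== PORT B =====
-- each generator-sum 'sum(1 for c in cadena if c == v)' is ported as the corresponding fold over the chars
def main_py_alt (cadena : String) (cont_A : Int) (cont_E : Int) : Bool :=
  let a : Int := cadena.toList.foldl (fun acc c => if c == 'A' then acc + 1 else acc) 0
  let e : Int := cadena.toList.foldl (fun acc c => if c == 'E' then acc + 1 else acc) 0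
  decide (cont_A + a > cont_E + e)

-- ===== PRECONDITION & SPEC =====
def Spec_main_py (cadena : String) (cont_A : Int) (cont_E : Int) (out : Bool) : Prop := out = main_py_alt cadena cont_A cont_E
instance (cadena : String) (cont_A : Int) (cont_E : Int) (out : Bool) : Decidable (Spec_main_py cadena cont_A cont_E out) := by unfold Spec_main_py; infer_instance

-- ===== CLAIM (what is proved, stated in full; the proofs are below) =====
def Claim_equal_main_py : Prop := ∀ (cadena : String) (cont_A : Int) (cont_E : Int), Dom_main_py cadena cont_A cont_E → Spec_main_py cadena cont_A cont_E (main_py cadena cont_A cont_E)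

-- ===== LEMMAS AND PROOFS =====

-- ===== VERDICT (by name: the statement is the Claim_ definition above) =====
lemma mainGo_eq (cs : List Char) (a e : Int) :
    mainGo cs a e = decide (a + (cs.count 'A' : Int) > e + (cs.count 'E' : Int)) := by
  induction cs generalizing a e with
  | nil => simp [mainGo]
  | cons c rest ih =>
      simp only [mainGo, List.count_cons]
      by_cases hA : c = 'A'
      · simp [hA, ih]; ring_nf
      · by_cases hE : c = 'E'
        · simp [hE, ih]; ring_nf
        · simp [hA, hE, ih]

theorem main_py_spec : Claim_equal_main_py := by
  intro cadena a e _
  unfold Spec_main_py main_py main_py_alt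
  simp only [mainGo_eq, PySem.List.foldl_beq_add_one]
  norm_num
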